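-- pv_equiv track=rewrite | github.com/GockSo/LoRA-Bento | scripts/caption/caption_blip2.py | remove_generic_phrases
-- ===== SOURCE A (Python) =====
-- GENERIC_PATTERNS = [
--     'a picture of ',
--     'an image of ',
--     'a photo of ',
--     'a photograph of ',
--     'a person ',
--     'a man ',
--     'a woman ',
-- ]
--
-- def remove_generic_phrases(text: str, avoid_generic: bool) -> str:
--     """Remove generic phrases from caption"""
--     if not avoid_generic:
--         return text
--
--     text_lower = text.lower()
--     for pattern in GENERIC_PATTERNS:
--         if text_lower.startswith(pattern):
--             text = text[len(pattern):]
--             break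
--
--     return text.strip()
-- ===== SOURCE B (Python) =====
-- _BY_SECOND_WORD = {
--     'picture': 'a picture of ',
--     'image': 'an image of ',
--     'photo': 'a photo of ',
--     'photograph': 'a photograph of ',
--     'person': 'a person ',
--     'man': 'a man ',
--     'woman': 'a woman ',
-- }
--
-- def remove_generic_phrases(text: str, avoid_generic: bool) -> str:
--     """Remove generic phrases from caption (second-word dict dispatch instead of scanning all patterns)"""
--     if not avoid_generic:
--         return text
--     low = text.lower()
--     parts = low.split(' ', 2)
--     if len(parts) >= 2:
--         pat = _BY_SECOND_WORD.get(parts[1])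
--         if pat is not None and low.startswith(pat):
--             text = text[len(pat):]
--     return text.strip()
-- ===== Notes on version B (the rewrite author's own statement) =====
-- stated objective: alternative
-- what changed: Instead of scanning all seven generic prefixes with startswith in order, B splits the lowercased caption's first two words once and dispatches through a dict keyed by the second word to the single candidate prefix, verified with one startswith; the patterns are mutually non-prefix, so the candidate is exactly A's first match.
import Mathlib
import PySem

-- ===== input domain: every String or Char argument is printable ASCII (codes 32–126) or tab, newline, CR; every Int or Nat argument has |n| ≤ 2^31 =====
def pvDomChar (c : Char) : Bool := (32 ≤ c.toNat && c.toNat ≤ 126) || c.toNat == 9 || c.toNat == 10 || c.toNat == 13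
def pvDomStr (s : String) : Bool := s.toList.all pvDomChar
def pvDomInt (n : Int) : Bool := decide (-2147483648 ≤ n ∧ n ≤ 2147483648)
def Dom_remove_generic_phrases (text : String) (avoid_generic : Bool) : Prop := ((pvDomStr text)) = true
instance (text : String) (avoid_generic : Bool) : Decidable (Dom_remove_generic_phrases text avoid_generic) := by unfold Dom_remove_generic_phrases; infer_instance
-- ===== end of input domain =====

-- B replaces A's ordered scan over all seven generic prefixes by a dict dispatch on the
-- caption's second word followed by a single prefix check (objective: alternative).


-- ===== PORT A =====
-- A scans the seven patterns in order and strips the first (case-insensitive) match.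
def genericPatterns : List String :=
  ["a picture of ", "an image of ", "a photo of ", "a photograph of ", "a person ", "a man ", "a woman "]

def rgpLoop (low : String) (text : String) : List String → String
  | [] => text
  | p :: rest =>
    if PySem.Str.startswith low p then PySem.Str.slice text (some (PySem.Str.len p)) none
    else rgpLoop low text rest

def remove_generic_phrases (text : String) (avoid_generic : Bool) : String :=
  if !avoid_generic then text
  else PySem.Str.strip (rgpLoop (PySem.Str.lower text) text genericPatterns)

-- ===== PORT B =====
def bySecondWord : PySem.Dict String String :=
  PySem.Dict.ofList [("picture", "a picture of "), ("image", "an image of "),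
    ("photo", "a photo of "), ("photograph", "a photograph of "),
    ("person", "a person "), ("man", "a man "), ("woman", "a woman ")]

def remove_generic_phrases_alt (text : String) (avoid_generic : Bool) : String :=
  if !avoid_generic then text
  else
    let low := PySem.Str.lower text
    let parts := (PySem.Str.splitMax? low " " 2).getD []
    let text2 :=
      match PySem.List.pyGet? parts 1 with
      | none => text
      | some w =>
        match PySem.Dict.get? bySecondWord w with
        | none => text
        | some pat =>
          if PySem.Str.startswith low pat then PySem.Str.slice text (some (PySem.Str.len pat)) none
          else text
    PySem.Str.strip text2


-- ===== PRECONDITION & SPEC =====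
def Spec_remove_generic_phrases (text : String) (avoid_generic : Bool) (out : String) : Prop := out = remove_generic_phrases_alt text avoid_generic
instance (text : String) (avoid_generic : Bool) (out : String) : Decidable (Spec_remove_generic_phrases text avoid_generic out) := by unfold Spec_remove_generic_phrases; infer_instance

-- ===== CLAIM (what is proved, stated in full; the proofs are below) =====
def Claim_equal_remove_generic_phrases : Prop := ∀ (text : String) (avoid_generic : Bool), Dom_remove_generic_phrases text avoid_generic → Spec_remove_generic_phrases text avoid_generic (remove_generic_phrases text avoid_generic)

-- ===== LEMMAS AND PROOFS =====
lemma go_zero (sep : List Char) (fuel : Nat) (l cur : List Char) (acc : List (List Char)) :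
    PySem.Chars.splitOnMax.go sep fuel 0 l cur acc = ((cur.reverse ++ l) :: acc).reverse := by
  cases fuel <;> cases l <;> simp [PySem.Chars.splitOnMax.go]

lemma three_of_map (xs : List String) (a b : String) (c : List Char)
    (h : xs.map String.toList = [a.toList, b.toList, c]) : ∃ r, xs = [a, b, r] := by
  rcases xs with _ | ⟨x, _ | ⟨y, _ | ⟨z, _ | ws⟩⟩⟩ <;> simp only [List.map_cons, List.map_nil] at h
  · exact absurd h (by simp)
  · exact absurd h (by simp)
  · exact absurd h (by simp)
  · simp only [List.cons.injEq, and_true] at h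
    exact ⟨z, by rw [String.ext h.1, String.ext h.2.1]⟩
  · exact absurd h (by simp)

lemma dict_cases (w pat : String) (h : PySem.Dict.get? bySecondWord w = some pat) :
    pat = "a picture of " ∨ pat = "an image of " ∨ pat = "a photo of " ∨
    pat = "a photograph of " ∨ pat = "a person " ∨ pat = "a man " ∨ pat = "a woman " := by
  have hmk : bySecondWord = PySem.Dict.mk [("picture", "a picture of "), ("image", "an image of "),
      ("photo", "a photo of "), ("photograph", "a photograph of "),
      ("person", "a person "), ("man", "a man "), ("woman", "a woman ")] := by decide
  rw [hmk] at h
  simp [PySem.Dict.get?_mk_cons] at h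
  split_ifs at h <;>
    first
      | (simp only [Option.some.injEq] at h; tauto)
      | (simp [PySem.Dict.get?] at h)

lemma chars_split_1 (t : List Char) :
    PySem.Chars.splitMax? ("a picture of ".toList ++ t) [' '] 2 = some ["a".toList, "picture".toList, 'o'::'f'::' '::t] := by
  simp [PySem.Chars.splitMax?, PySem.Chars.splitOnMax, PySem.Chars.splitOnMax.go, go_zero]

lemma parts_1 (low : String) (h : PySem.Str.startswith low "a picture of " = true) :
    ∃ r, PySem.Str.splitMax? low " " 2 = some ["a", "picture", r] := by
  rw [PySem.Str.startswith_eq] at h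
  obtain ⟨t, ht⟩ := (PySem.Chars.startswith_iff _ _).1 h
  have hc : PySem.Chars.splitMax? low.toList " ".toList 2
      = some ["a".toList, "picture".toList, 'o'::'f'::' '::t] := by
    rw [← ht]; exact chars_split_1 t
  have hm := PySem.Str.splitMax?_map low " " 2
  rw [hc] at hm
  cases ho : PySem.Str.splitMax? low " " 2 with
  | none => rw [ho] at hm; simp at hm
  | some xs =>
    rw [ho] at hm
    simp only [Option.map_some, Option.some.injEq] at hm
    obtain ⟨r, hr⟩ := three_of_map xs "a" "picture" _ hm
    exact ⟨r, by rw [hr]⟩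

lemma chars_split_2 (t : List Char) :
    PySem.Chars.splitMax? ("an image of ".toList ++ t) [' '] 2 = some ["an".toList, "image".toList, 'o'::'f'::' '::t] := by
  simp [PySem.Chars.splitMax?, PySem.Chars.splitOnMax, PySem.Chars.splitOnMax.go, go_zero]

lemma parts_2 (low : String) (h : PySem.Str.startswith low "an image of " = true) :
    ∃ r, PySem.Str.splitMax? low " " 2 = some ["an", "image", r] := by
  rw [PySem.Str.startswith_eq] at h
  obtain ⟨t, ht⟩ := (PySem.Chars.startswith_iff _ _).1 h
  have hc : PySem.Chars.splitMax? low.toList " ".toList 2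
      = some ["an".toList, "image".toList, 'o'::'f'::' '::t] := by
    rw [← ht]; exact chars_split_2 t
  have hm := PySem.Str.splitMax?_map low " " 2
  rw [hc] at hm
  cases ho : PySem.Str.splitMax? low " " 2 with
  | none => rw [ho] at hm; simp at hm
  | some xs =>
    rw [ho] at hm
    simp only [Option.map_some, Option.some.injEq] at hm
    obtain ⟨r, hr⟩ := three_of_map xs "an" "image" _ hm
    exact ⟨r, by rw [hr]⟩

lemma chars_split_3 (t : List Char) :
    PySem.Chars.splitMax? ("a photo of ".toList ++ t) [' '] 2 = some ["a".toList, "photo".toList, 'o'::'f'::' '::t] := by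
  simp [PySem.Chars.splitMax?, PySem.Chars.splitOnMax, PySem.Chars.splitOnMax.go, go_zero]

lemma parts_3 (low : String) (h : PySem.Str.startswith low "a photo of " = true) :
    ∃ r, PySem.Str.splitMax? low " " 2 = some ["a", "photo", r] := by
  rw [PySem.Str.startswith_eq] at h
  obtain ⟨t, ht⟩ := (PySem.Chars.startswith_iff _ _).1 h
  have hc : PySem.Chars.splitMax? low.toList " ".toList 2
      = some ["a".toList, "photo".toList, 'o'::'f'::' '::t] := by
    rw [← ht]; exact chars_split_3 t
  have hm := PySem.Str.splitMax?_map low " " 2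
  rw [hc] at hm
  cases ho : PySem.Str.splitMax? low " " 2 with
  | none => rw [ho] at hm; simp at hm
  | some xs =>
    rw [ho] at hm
    simp only [Option.map_some, Option.some.injEq] at hm
    obtain ⟨r, hr⟩ := three_of_map xs "a" "photo" _ hm
    exact ⟨r, by rw [hr]⟩

lemma chars_split_4 (t : List Char) :
    PySem.Chars.splitMax? ("a photograph of ".toList ++ t) [' '] 2 = some ["a".toList, "photograph".toList, 'o'::'f'::' '::t] := by
  simp [PySem.Chars.splitMax?, PySem.Chars.splitOnMax, PySem.Chars.splitOnMax.go, go_zero]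

lemma parts_4 (low : String) (h : PySem.Str.startswith low "a photograph of " = true) :
    ∃ r, PySem.Str.splitMax? low " " 2 = some ["a", "photograph", r] := by
  rw [PySem.Str.startswith_eq] at h
  obtain ⟨t, ht⟩ := (PySem.Chars.startswith_iff _ _).1 h
  have hc : PySem.Chars.splitMax? low.toList " ".toList 2
      = some ["a".toList, "photograph".toList, 'o'::'f'::' '::t] := by
    rw [← ht]; exact chars_split_4 t
  have hm := PySem.Str.splitMax?_map low " " 2
  rw [hc] at hm
  cases ho : PySem.Str.splitMax? low " " 2 with
  | none => rw [ho] at hm; simp at hm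
  | some xs =>
    rw [ho] at hm
    simp only [Option.map_some, Option.some.injEq] at hm
    obtain ⟨r, hr⟩ := three_of_map xs "a" "photograph" _ hm
    exact ⟨r, by rw [hr]⟩

lemma chars_split_5 (t : List Char) :
    PySem.Chars.splitMax? ("a person ".toList ++ t) [' '] 2 = some ["a".toList, "person".toList, t] := by
  simp [PySem.Chars.splitMax?, PySem.Chars.splitOnMax, PySem.Chars.splitOnMax.go, go_zero]

lemma parts_5 (low : String) (h : PySem.Str.startswith low "a person " = true) :
    ∃ r, PySem.Str.splitMax? low " " 2 = some ["a", "person", r] := by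
  rw [PySem.Str.startswith_eq] at h
  obtain ⟨t, ht⟩ := (PySem.Chars.startswith_iff _ _).1 h
  have hc : PySem.Chars.splitMax? low.toList " ".toList 2
      = some ["a".toList, "person".toList, t] := by
    rw [← ht]; exact chars_split_5 t
  have hm := PySem.Str.splitMax?_map low " " 2
  rw [hc] at hm
  cases ho : PySem.Str.splitMax? low " " 2 with
  | none => rw [ho] at hm; simp at hm
  | some xs =>
    rw [ho] at hm
    simp only [Option.map_some, Option.some.injEq] at hm
    obtain ⟨r, hr⟩ := three_of_map xs "a" "person" _ hm
    exact ⟨r, by rw [hr]⟩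

lemma chars_split_6 (t : List Char) :
    PySem.Chars.splitMax? ("a man ".toList ++ t) [' '] 2 = some ["a".toList, "man".toList, t] := by
  simp [PySem.Chars.splitMax?, PySem.Chars.splitOnMax, PySem.Chars.splitOnMax.go, go_zero]

lemma parts_6 (low : String) (h : PySem.Str.startswith low "a man " = true) :
    ∃ r, PySem.Str.splitMax? low " " 2 = some ["a", "man", r] := by
  rw [PySem.Str.startswith_eq] at h
  obtain ⟨t, ht⟩ := (PySem.Chars.startswith_iff _ _).1 h
  have hc : PySem.Chars.splitMax? low.toList " ".toList 2
      = some ["a".toList, "man".toList, t] := by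
    rw [← ht]; exact chars_split_6 t
  have hm := PySem.Str.splitMax?_map low " " 2
  rw [hc] at hm
  cases ho : PySem.Str.splitMax? low " " 2 with
  | none => rw [ho] at hm; simp at hm
  | some xs =>
    rw [ho] at hm
    simp only [Option.map_some, Option.some.injEq] at hm
    obtain ⟨r, hr⟩ := three_of_map xs "a" "man" _ hm
    exact ⟨r, by rw [hr]⟩

lemma chars_split_7 (t : List Char) :
    PySem.Chars.splitMax? ("a woman ".toList ++ t) [' '] 2 = some ["a".toList, "woman".toList, t] := by
  simp [PySem.Chars.splitMax?, PySem.Chars.splitOnMax, PySem.Chars.splitOnMax.go, go_zero]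

lemma parts_7 (low : String) (h : PySem.Str.startswith low "a woman " = true) :
    ∃ r, PySem.Str.splitMax? low " " 2 = some ["a", "woman", r] := by
  rw [PySem.Str.startswith_eq] at h
  obtain ⟨t, ht⟩ := (PySem.Chars.startswith_iff _ _).1 h
  have hc : PySem.Chars.splitMax? low.toList " ".toList 2
      = some ["a".toList, "woman".toList, t] := by
    rw [← ht]; exact chars_split_7 t
  have hm := PySem.Str.splitMax?_map low " " 2
  rw [hc] at hm
  cases ho : PySem.Str.splitMax? low " " 2 with
  | none => rw [ho] at hm; simp at hm
  | some xs =>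
    rw [ho] at hm
    simp only [Option.map_some, Option.some.injEq] at hm
    obtain ⟨r, hr⟩ := three_of_map xs "a" "woman" _ hm
    exact ⟨r, by rw [hr]⟩

lemma dg_1 : PySem.Dict.get? bySecondWord "picture" = some "a picture of " := by decide
lemma dg_2 : PySem.Dict.get? bySecondWord "image" = some "an image of " := by decide
lemma dg_3 : PySem.Dict.get? bySecondWord "photo" = some "a photo of " := by decide
lemma dg_4 : PySem.Dict.get? bySecondWord "photograph" = some "a photograph of " := by decide
lemma dg_5 : PySem.Dict.get? bySecondWord "person" = some "a person " := by decide
lemma dg_6 : PySem.Dict.get? bySecondWord "man" = some "a man " := by decide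
lemma dg_7 : PySem.Dict.get? bySecondWord "woman" = some "a woman " := by decide

theorem ab_eq : ∀ (text : String) (avoid_generic : Bool),
    remove_generic_phrases text avoid_generic = remove_generic_phrases_alt text avoid_generic := by
  intro text avoid
  cases avoid with
  | false => simp only [remove_generic_phrases, remove_generic_phrases_alt, Bool.not_false, if_true]
  | true =>
    by_cases h1 : PySem.Str.startswith (PySem.Str.lower text) "a picture of " = true
    · obtain ⟨r, hp⟩ := parts_1 (PySem.Str.lower text) h1
      simp only [remove_generic_phrases, remove_generic_phrases_alt, Bool.not_true, Bool.false_eq_true,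
        if_false, rgpLoop, genericPatterns, h1, if_true, hp, Option.getD_some]
      simp only [PySem.List.pyGet?, PySem.List.pyIdx?]
      norm_num
      rw [dg_1]
      simp only [PySem.Str.startswith_eq, PySem.Str.toList_lower] at h1
      have h1' : PySem.Chars.startswith (PySem.Chars.lower text.toList)
          ['a', ' ', 'p', 'i', 'c', 't', 'u', 'r', 'e', ' ', 'o', 'f', ' '] = true := by simpa using h1
      simp [h1']
    by_cases h2 : PySem.Str.startswith (PySem.Str.lower text) "an image of " = true
    · obtain ⟨r, hp⟩ := parts_2 (PySem.Str.lower text) h2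
      simp only [remove_generic_phrases, remove_generic_phrases_alt, Bool.not_true, Bool.false_eq_true,
        if_false, rgpLoop, genericPatterns, h1, h2, if_true, hp, Option.getD_some]
      simp only [PySem.List.pyGet?, PySem.List.pyIdx?]
      norm_num
      rw [dg_2]
      simp only [PySem.Str.startswith_eq, PySem.Str.toList_lower] at h2
      have h2' : PySem.Chars.startswith (PySem.Chars.lower text.toList)
          ['a', 'n', ' ', 'i', 'm', 'a', 'g', 'e', ' ', 'o', 'f', ' '] = true := by simpa using h2
      simp [h2']
    by_cases h3 : PySem.Str.startswith (PySem.Str.lower text) "a photo of " = true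
    · obtain ⟨r, hp⟩ := parts_3 (PySem.Str.lower text) h3
      simp only [remove_generic_phrases, remove_generic_phrases_alt, Bool.not_true, Bool.false_eq_true,
        if_false, rgpLoop, genericPatterns, h1, h2, h3, if_true, hp, Option.getD_some]
      simp only [PySem.List.pyGet?, PySem.List.pyIdx?]
      norm_num
      rw [dg_3]
      simp only [PySem.Str.startswith_eq, PySem.Str.toList_lower] at h3
      have h3' : PySem.Chars.startswith (PySem.Chars.lower text.toList)
          ['a', ' ', 'p', 'h', 'o', 't', 'o', ' ', 'o', 'f', ' '] = true := by simpa using h3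
      simp [h3']
    by_cases h4 : PySem.Str.startswith (PySem.Str.lower text) "a photograph of " = true
    · obtain ⟨r, hp⟩ := parts_4 (PySem.Str.lower text) h4
      simp only [remove_generic_phrases, remove_generic_phrases_alt, Bool.not_true, Bool.false_eq_true,
        if_false, rgpLoop, genericPatterns, h1, h2, h3, h4, if_true, hp, Option.getD_some]
      simp only [PySem.List.pyGet?, PySem.List.pyIdx?]
      norm_num
      rw [dg_4]
      simp only [PySem.Str.startswith_eq, PySem.Str.toList_lower] at h4
      have h4' : PySem.Chars.startswith (PySem.Chars.lower text.toList)
          ['a', ' ', 'p', 'h', 'o', 't', 'o', 'g', 'r', 'a', 'p', 'h', ' ', 'o', 'f', ' '] = true := by simpa using h4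
      simp [h4']
    by_cases h5 : PySem.Str.startswith (PySem.Str.lower text) "a person " = true
    · obtain ⟨r, hp⟩ := parts_5 (PySem.Str.lower text) h5
      simp only [remove_generic_phrases, remove_generic_phrases_alt, Bool.not_true, Bool.false_eq_true,
        if_false, rgpLoop, genericPatterns, h1, h2, h3, h4, h5, if_true, hp, Option.getD_some]
      simp only [PySem.List.pyGet?, PySem.List.pyIdx?]
      norm_num
      rw [dg_5]
      simp only [PySem.Str.startswith_eq, PySem.Str.toList_lower] at h5
      have h5' : PySem.Chars.startswith (PySem.Chars.lower text.toList)
          ['a', ' ', 'p', 'e', 'r', 's', 'o', 'n', ' '] = true := by simpa using h5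
      simp [h5']
    by_cases h6 : PySem.Str.startswith (PySem.Str.lower text) "a man " = true
    · obtain ⟨r, hp⟩ := parts_6 (PySem.Str.lower text) h6
      simp only [remove_generic_phrases, remove_generic_phrases_alt, Bool.not_true, Bool.false_eq_true,
        if_false, rgpLoop, genericPatterns, h1, h2, h3, h4, h5, h6, if_true, hp, Option.getD_some]
      simp only [PySem.List.pyGet?, PySem.List.pyIdx?]
      norm_num
      rw [dg_6]
      simp only [PySem.Str.startswith_eq, PySem.Str.toList_lower] at h6
      have h6' : PySem.Chars.startswith (PySem.Chars.lower text.toList)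
          ['a', ' ', 'm', 'a', 'n', ' '] = true := by simpa using h6
      simp [h6']
    by_cases h7 : PySem.Str.startswith (PySem.Str.lower text) "a woman " = true
    · obtain ⟨r, hp⟩ := parts_7 (PySem.Str.lower text) h7
      simp only [remove_generic_phrases, remove_generic_phrases_alt, Bool.not_true, Bool.false_eq_true,
        if_false, rgpLoop, genericPatterns, h1, h2, h3, h4, h5, h6, h7, if_true, hp, Option.getD_some]
      simp only [PySem.List.pyGet?, PySem.List.pyIdx?]
      norm_num
      rw [dg_7]
      simp only [PySem.Str.startswith_eq, PySem.Str.toList_lower] at h7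
      have h7' : PySem.Chars.startswith (PySem.Chars.lower text.toList)
          ['a', ' ', 'w', 'o', 'm', 'a', 'n', ' '] = true := by simpa using h7
      simp [h7']
    have n1 : PySem.Chars.startswith (PySem.Chars.lower text.toList)
        ['a', ' ', 'p', 'i', 'c', 't', 'u', 'r', 'e', ' ', 'o', 'f', ' '] = false := by
      simpa [PySem.Str.startswith_eq, PySem.Str.toList_lower] using h1
    have n2 : PySem.Chars.startswith (PySem.Chars.lower text.toList)
        ['a', 'n', ' ', 'i', 'm', 'a', 'g', 'e', ' ', 'o', 'f', ' '] = false := by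
      simpa [PySem.Str.startswith_eq, PySem.Str.toList_lower] using h2
    have n3 : PySem.Chars.startswith (PySem.Chars.lower text.toList)
        ['a', ' ', 'p', 'h', 'o', 't', 'o', ' ', 'o', 'f', ' '] = false := by
      simpa [PySem.Str.startswith_eq, PySem.Str.toList_lower] using h3
    have n4 : PySem.Chars.startswith (PySem.Chars.lower text.toList)
        ['a', ' ', 'p', 'h', 'o', 't', 'o', 'g', 'r', 'a', 'p', 'h', ' ', 'o', 'f', ' '] = false := by
      simpa [PySem.Str.startswith_eq, PySem.Str.toList_lower] using h4
    have n5 : PySem.Chars.startswith (PySem.Chars.lower text.toList)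
        ['a', ' ', 'p', 'e', 'r', 's', 'o', 'n', ' '] = false := by
      simpa [PySem.Str.startswith_eq, PySem.Str.toList_lower] using h5
    have n6 : PySem.Chars.startswith (PySem.Chars.lower text.toList)
        ['a', ' ', 'm', 'a', 'n', ' '] = false := by
      simpa [PySem.Str.startswith_eq, PySem.Str.toList_lower] using h6
    have n7 : PySem.Chars.startswith (PySem.Chars.lower text.toList)
        ['a', ' ', 'w', 'o', 'm', 'a', 'n', ' '] = false := by
      simpa [PySem.Str.startswith_eq, PySem.Str.toList_lower] using h7
    simp only [remove_generic_phrases, remove_generic_phrases_alt, Bool.not_true, Bool.false_eq_true,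
      if_false, rgpLoop, genericPatterns, h1, h2, h3, h4, h5, h6, h7]
    rcases hg : PySem.List.pyGet? ((PySem.Str.splitMax? (PySem.Str.lower text) " " 2).getD []) 1 with _ | ww
    · simp
    · rcases hd : PySem.Dict.get? bySecondWord ww with _ | pat
      · simp [hd]
      · rcases dict_cases ww pat hd with h|h|h|h|h|h|h <;> subst h <;>
          simp [hd, n1, n2, n3, n4, n5, n6, n7]

-- ===== VERDICT (by name: the statement is the Claim_ definition above) =====
theorem remove_generic_phrases_spec : Claim_equal_remove_generic_phrases := by
  intro text avoid _
  exact ab_eq text avoid
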